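-- pv_equiv track=rewrite | github.com/thanhan910/MATA-AND-OR | utils/problem.py | get_constraints
-- ===== SOURCE A (Python) =====
-- def get_constraints(agents, tasks):
--     """
--     Calculate the constraints of the system, where the system consists of tasks and agents with constraints.
--
--     :param: `agents`: the list of agents
--     :param: `tasks`: the list of tasks
--     :return: For each agent, the list of tasks it has the capabilities to work on. For each task, the list of agents that could work on it.
--     """
--     a_taskInds = []
--     t_agentInds = []
--     for agent in agents:
--         a_taskInds.append([j for j, task in enumerate(tasks) if set(task) <= set(agent)])
--     for task in tasks:
--         t_agentInds.append([i for i, agent in enumerate(agents) if set(task) <= set(agent)])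
--     return a_taskInds, t_agentInds
-- ===== SOURCE B (Python) =====
-- def get_constraints(agents, tasks):
--     # Compute the task-side adjacency once, then derive the agent-side lists by
--     # transposing that table instead of re-testing every subset relation.
--     t_agentInds = []
--     for task in tasks:
--         tset = set(task)
--         row = []
--         for i, agent in enumerate(agents):
--             if tset.issubset(agent):
--                 row.append(i)
--         t_agentInds.append(row)
--     a_taskInds = [[] for _ in agents]
--     for j, inds in enumerate(t_agentInds):
--         for i in inds:
--             a_taskInds[i].append(j)
--     return a_taskInds, t_agentInds
-- ===== Notes on version B (the rewrite author's own statement) =====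
-- stated objective: faster
-- what changed: B computes the subset relation only once (task side) and derives each agent's task list by transposing that table, instead of re-testing every (agent, task) subset pair a second time; the subset test itself uses one prebuilt set per task.
import Mathlib
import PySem

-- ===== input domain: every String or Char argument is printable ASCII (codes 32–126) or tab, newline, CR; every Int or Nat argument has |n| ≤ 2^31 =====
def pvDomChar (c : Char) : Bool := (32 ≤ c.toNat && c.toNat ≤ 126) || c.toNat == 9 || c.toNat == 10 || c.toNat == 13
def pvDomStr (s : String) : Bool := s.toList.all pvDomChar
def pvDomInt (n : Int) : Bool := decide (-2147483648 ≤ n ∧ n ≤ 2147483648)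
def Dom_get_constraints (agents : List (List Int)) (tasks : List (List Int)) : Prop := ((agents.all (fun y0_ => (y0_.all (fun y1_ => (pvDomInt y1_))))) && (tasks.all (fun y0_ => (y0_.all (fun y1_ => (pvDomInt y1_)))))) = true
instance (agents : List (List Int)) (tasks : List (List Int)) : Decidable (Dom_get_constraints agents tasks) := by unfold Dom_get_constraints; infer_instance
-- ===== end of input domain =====

-- B derives the agent-side lists by transposing the task-side table instead of re-testing every subset pair (one subset pass instead of two).

-- ===== PORT A =====
def get_constraints (agents : List (List Int)) (tasks : List (List Int)) : List (List Int) × List (List Int) :=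
  let a_taskInds := agents.map (fun agent =>
    (PySem.List.enumerate tasks).filterMap (fun p =>
      if PySem.Set.issubset (PySem.Set.ofList p.2) (PySem.Set.ofList agent) then some p.1 else none))
  let t_agentInds := tasks.map (fun task =>
    (PySem.List.enumerate agents).filterMap (fun p =>
      if PySem.Set.issubset (PySem.Set.ofList task) (PySem.Set.ofList p.2) then some p.1 else none))
  (a_taskInds, t_agentInds)

-- ===== PORT B =====
-- a_taskInds[i].append(j)  (i is a valid index produced by enumerate, so always in range)
def pvAppendAt (bk : List (List Int)) (i : Nat) (j : Int) : List (List Int) :=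
  bk.set i (bk.getD i [] ++ [j])

def get_constraints_alt (agents : List (List Int)) (tasks : List (List Int)) : List (List Int) × List (List Int) :=
  let t_agentInds := tasks.map (fun task =>
    (PySem.List.enumerate agents).filterMap (fun p =>
      if PySem.Set.issubset (PySem.Set.ofList task) p.2 then some p.1 else none))
  let a0 : List (List Int) := agents.map (fun _ => [])
  let a_taskInds := (PySem.List.enumerate t_agentInds).foldl
    (fun bk p => p.2.foldl (fun bk2 i => pvAppendAt bk2 i.toNat p.1) bk) a0
  (a_taskInds, t_agentInds)

-- ===== PRECONDITION & SPEC =====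
def Spec_get_constraints (agents : List (List Int)) (tasks : List (List Int)) (out : List (List Int) × List (List Int)) : Prop := out = get_constraints_alt agents tasks
instance (agents : List (List Int)) (tasks : List (List Int)) (out : List (List Int) × List (List Int)) : Decidable (Spec_get_constraints agents tasks out) := by unfold Spec_get_constraints; infer_instance

-- ===== CLAIM (what is proved, stated in full; the proofs are below) =====
def Claim_equal_get_constraints : Prop := ∀ (agents : List (List Int)) (tasks : List (List Int)), Dom_get_constraints agents tasks → Spec_get_constraints agents tasks (get_constraints agents tasks)

-- ===== LEMMAS AND PROOFS =====

-- the subset predicate used by both sides (second argument of issubset may be a raw list)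
theorem pv_issubset_ofList (task agent : List Int) :
    PySem.Set.issubset (PySem.Set.ofList task) (PySem.Set.ofList agent)
      = PySem.Set.issubset (PySem.Set.ofList task) agent := by
  rcases h : PySem.Set.issubset (PySem.Set.ofList task) agent with _ | _
  · rcases h2 : PySem.Set.issubset (PySem.Set.ofList task) (PySem.Set.ofList agent) with _ | _
    · rfl
    · exfalso
      rw [PySem.Set.issubset_iff] at h2
      rw [Bool.eq_false_iff, Ne, PySem.Set.issubset_iff] at h
      exact h (fun x hx => by have := h2 x hx; rwa [PySem.Set.mem_ofList] at this)
  · rw [PySem.Set.issubset_iff] at h ⊢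
    exact fun x hx => by rw [PySem.Set.mem_ofList]; exact h x hx

theorem pvAppendAt_length (bk : List (List Int)) (i : Nat) (j : Int) :
    (pvAppendAt bk i j).length = bk.length := by
  simp [pvAppendAt]

theorem pv_inner_length (j : Int) (S : List Int) (bk : List (List Int)) :
    (S.foldl (fun bk2 i => pvAppendAt bk2 i.toNat j) bk).length = bk.length := by
  induction S generalizing bk with
  | nil => rfl
  | cons i S ih => simp [List.foldl_cons, ih, pvAppendAt_length]

theorem pv_inner_getD (j : Int) (S : List Int) (bk : List (List Int))
    (hpos : ∀ i ∈ S, 0 ≤ i) (hnd : (S.map Int.toNat).Nodup)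
    (m : Nat) (hm : m < bk.length) :
    (S.foldl (fun bk2 i => pvAppendAt bk2 i.toNat j) bk).getD m []
      = bk.getD m [] ++ (if (m : Int) ∈ S then [j] else []) := by
  induction S generalizing bk with
  | nil => simp
  | cons i S ih =>
    simp only [List.map_cons, List.nodup_cons] at hnd
    have hi : 0 ≤ i := hpos i (by simp)
    rw [List.foldl_cons]
    rw [ih _ (fun x hx => hpos x (by simp [hx])) hnd.2 (by rw [pvAppendAt_length]; exact hm)]
    by_cases hmi : (m : Int) = i
    · have hiton : i.toNat = m := by omega
      have hnotS : (m : Int) ∉ S := by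
        intro hmem
        exact hnd.1 (by rw [hiton]; exact List.mem_map.mpr ⟨(m : Int), hmem, by omega⟩)
      rw [if_pos (List.mem_cons.mpr (Or.inl hmi)), if_neg hnotS, List.append_nil]
      unfold pvAppendAt
      rw [hiton]
      rw [List.getD_eq_getElem _ _ (by simpa using hm), List.getElem_set_self,
        List.getD_eq_getElem _ _ hm]
    · have hiton : i.toNat ≠ m := by omega
      have hsame : (pvAppendAt bk i.toNat j).getD m [] = bk.getD m [] := by
        simp [pvAppendAt, List.getD_eq_getElem?_getD, List.getElem?_set_ne hiton]
      rw [hsame]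
      simp [List.mem_cons, hmi]

theorem pv_outer_length (ts : List (Int × List Int)) (bk : List (List Int)) :
    (ts.foldl (fun bk p => p.2.foldl (fun bk2 i => pvAppendAt bk2 i.toNat p.1) bk) bk).length
      = bk.length := by
  induction ts generalizing bk with
  | nil => rfl
  | cons p ts ih => simp [List.foldl_cons, ih, pv_inner_length]

theorem pv_outer_getD (ts : List (Int × List Int)) (bk : List (List Int))
    (h : ∀ p ∈ ts, (∀ i ∈ p.2, 0 ≤ i) ∧ (p.2.map Int.toNat).Nodup)
    (m : Nat) (hm : m < bk.length) :
    (ts.foldl (fun bk p => p.2.foldl (fun bk2 i => pvAppendAt bk2 i.toNat p.1) bk) bk).getD m []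
      = bk.getD m [] ++ ts.filterMap (fun p => if (m : Int) ∈ p.2 then some p.1 else none) := by
  induction ts generalizing bk with
  | nil => simp
  | cons p ts ih =>
    obtain ⟨hp1, hp2⟩ := h p (by simp)
    rw [List.foldl_cons]
    rw [ih _ (fun q hq => h q (by simp [hq])) (by rw [pv_inner_length]; exact hm)]
    rw [pv_inner_getD p.1 p.2 bk hp1 hp2 m hm]
    by_cases hmem : (m : Int) ∈ p.2 <;> simp [hmem]

-- the task-side row B builds for one task
def pvRow (agents : List (List Int)) (task : List Int) : List Int :=
  (PySem.List.enumerate agents).filterMap (fun p =>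
    if PySem.Set.issubset (PySem.Set.ofList task) p.2 then some p.1 else none)

theorem pvRow_nonneg (agents : List (List Int)) (task : List Int) :
    ∀ i ∈ pvRow agents task, 0 ≤ i := by
  intro i hi
  obtain ⟨p, hp, hfp⟩ := List.mem_filterMap.mp hi
  obtain ⟨k, hk, rfl⟩ := (PySem.List.mem_enumerate_iff _ _ _).mp hp
  split at hfp
  · cases hfp; omega
  · cases hfp

theorem pvRow_pairwise (agents : List (List Int)) (task : List Int) :
    (pvRow agents task).Pairwise (· < ·) := by
  unfold pvRow
  rw [List.pairwise_filterMap]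
  refine (PySem.List.pairwise_lt_enumerate agents 0).imp_of_mem ?_
  intro a b _ _ hab x hx y hy
  split at hx <;> split at hy <;> simp_all

theorem pvRow_toNat_nodup (agents : List (List Int)) (task : List Int) :
    ((pvRow agents task).map Int.toNat).Nodup := by
  have hp := pvRow_pairwise agents task
  have hnn := pvRow_nonneg agents task
  rw [List.nodup_iff_pairwise_ne, List.pairwise_map]
  refine hp.imp_of_mem ?_
  intro a b ha hb hlt
  have := hnn a ha
  omega

theorem pvRow_mem (agents : List (List Int)) (task : List Int) (m : Nat)
    (hm : m < agents.length) :
    ((m : Int) ∈ pvRow agents task)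
      ↔ PySem.Set.issubset (PySem.Set.ofList task) (agents.getD m []) = true := by
  unfold pvRow
  rw [List.mem_filterMap]
  constructor
  · rintro ⟨p, hp, hfp⟩
    obtain ⟨k, hk, rfl⟩ := (PySem.List.mem_enumerate_iff _ _ _).mp hp
    split at hfp
    · rename_i hcond
      obtain rfl : k = m := by simpa using hfp
      rwa [List.getD_eq_getElem _ _ hm]
    · cases hfp
  · intro hcond
    refine ⟨((m : Int), agents.getD m []), ?_, ?_⟩
    · refine (PySem.List.mem_enumerate_iff _ _ _).mpr ⟨m, hm, ?_⟩
      rw [List.getD_eq_getElem _ _ hm]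
      simp
    · rw [if_pos hcond]

theorem pv_enumerate_map {α β : Type} (f : α → β) (xs : List α) (s : Int) :
    PySem.List.enumerate (xs.map f) s
      = (PySem.List.enumerate xs s).map (fun p => (p.1, f p.2)) := by
  induction xs generalizing s with
  | nil => rfl
  | cons x xs ih => simp [PySem.List.enumerate_cons, ih]

theorem get_constraints_spec : Claim_equal_get_constraints := by
  intro agents tasks _
  unfold Spec_get_constraints get_constraints get_constraints_alt
  simp only [pv_issubset_ofList]
  have hrow : (fun task => List.filterMap (fun p =>
      if PySem.Set.issubset (PySem.Set.ofList task) p.2 then some p.1 else none)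
      (PySem.List.enumerate agents)) = pvRow agents := rfl
  rw [hrow]
  refine Prod.ext ?_ rfl
  dsimp only
  have hts : ∀ p ∈ PySem.List.enumerate (tasks.map (pvRow agents)),
      (∀ i ∈ p.2, 0 ≤ i) ∧ ((p.2.map Int.toNat).Nodup) := by
    intro p hp
    obtain ⟨k, hk, rfl⟩ := (PySem.List.mem_enumerate_iff _ _ _).mp hp
    simp only [List.getElem_map]
    exact ⟨pvRow_nonneg _ _, pvRow_toNat_nodup _ _⟩
  have hlenB : ((PySem.List.enumerate (tasks.map (pvRow agents))).foldl
      (fun bk p => p.2.foldl (fun bk2 i => pvAppendAt bk2 i.toNat p.1) bk)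
      (agents.map (fun _ => ([] : List Int)))).length = agents.length := by
    rw [pv_outer_length, List.length_map]
  apply List.ext_getElem (by rw [List.length_map, hlenB])
  intro m hmA hmB
  have hm : m < agents.length := by rwa [List.length_map] at hmA
  rw [List.getElem_map]
  rw [← List.getD_eq_getElem _ ([] : List Int) hmB]
  rw [pv_outer_getD _ _ hts m (by rw [List.length_map]; exact hm)]
  have h0 : (agents.map (fun _ => ([] : List Int))).getD m [] = [] := by
    rw [List.getD_eq_getElem _ _ (by rwa [List.length_map]), List.getElem_map]
  rw [h0, List.nil_append, pv_enumerate_map, List.filterMap_map]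
  apply List.filterMap_congr
  intro q hq
  simp only [Function.comp_apply]
  have hiff : ((m : Int) ∈ pvRow agents q.2)
      ↔ PySem.Set.issubset (PySem.Set.ofList q.2) agents[m] = true := by
    have h := pvRow_mem agents q.2 m hm
    rwa [List.getD_eq_getElem _ _ hm] at h
  exact if_congr hiff.symm rfl rfl
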